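-- pv_equiv track=rewrite | github.com/KevinKloosterman/advent-of-code-2024 | day04/part1.py | skew_left
-- ===== SOURCE A (Python) =====
-- def skew_left(grid):
--     row_count = len(grid)
--     col_count = len(grid[0])
--
--     skewed = ['' for _ in range(row_count + col_count - 1)]
--
--     for row in range(row_count):
--         for col in range(col_count):
--             diagonal_index = (col_count - 1 - col) + row
--             skewed[diagonal_index] += grid[row][col]
--
--     return skewed
-- ===== SOURCE B (Python) =====
-- def skew_left(grid):
--     row_count = len(grid)
--     col_count = len(grid[0])
--
--     result = []
--     for d in range(row_count + col_count - 1):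
--         lo = max(0, d - col_count + 1)
--         hi = min(row_count, d + 1)
--         result.append(''.join(grid[row][col_count - 1 - d + row] for row in range(lo, hi)))
--     return result
-- ===== Notes on version B (the rewrite author's own statement) =====
-- stated objective: alternative
-- what changed: B inverts the loop nesting: instead of A's scatter of every cell into a preallocated bucket array indexed by diagonal, B loops over each output diagonal d and gathers its characters directly by computing col = col_count-1-d+row for each row and iterating only the in-range rows lo..hi.
-- outside the precondition, e.g. on skew_left([]): A raises IndexError, B raises IndexError; on skew_left(['AB', 'C']): A raises IndexError, B raises IndexError
import Mathlib
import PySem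

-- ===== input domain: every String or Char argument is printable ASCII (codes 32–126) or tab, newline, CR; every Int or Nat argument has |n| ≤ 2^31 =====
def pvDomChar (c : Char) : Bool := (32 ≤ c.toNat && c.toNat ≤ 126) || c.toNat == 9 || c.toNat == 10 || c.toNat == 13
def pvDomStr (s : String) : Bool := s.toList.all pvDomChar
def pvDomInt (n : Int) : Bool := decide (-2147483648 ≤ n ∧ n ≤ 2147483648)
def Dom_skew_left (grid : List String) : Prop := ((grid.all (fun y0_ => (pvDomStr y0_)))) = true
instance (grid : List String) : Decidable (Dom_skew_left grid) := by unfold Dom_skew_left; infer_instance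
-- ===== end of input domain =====

-- B gathers each output diagonal directly (outer loop over diagonals, inner over rows)
-- instead of A's scatter of every cell into a bucket array: a different decomposition, not faster.

-- ===== PORT A =====
-- grid[row][col]: Pre_ guarantees every row has at least col_count chars, so getD's default is never read.
def pvStepA (grid : List String) (col_count row : Nat) (sk : List (List Char)) (col : Nat) : List (List Char) :=
  let diagonal_index := (col_count - 1 - col) + row
  sk.set diagonal_index ((sk.getD diagonal_index []) ++
    [((PySem.List.pyGetD grid (row : Int) "").toList).getD col ' '])

def pvInnerA (grid : List String) (col_count row : Nat) (sk : List (List Char)) : List (List Char) :=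
  (List.range col_count).foldl (pvStepA grid col_count row) sk

def skew_left (grid : List String) : List String :=
  let row_count := grid.length
  let col_count := (PySem.List.pyGetD grid 0 "").toList.length
  ((List.range row_count).foldl (fun sk row => pvInnerA grid col_count row sk)
      (List.replicate (row_count + col_count - 1) [])).map (fun cs => String.mk cs)

-- ===== PORT B =====
-- Python's col_count - 1 - d + row is computed as cc - 1 - (d - row): equal in Nat since the
-- row range guarantees row <= d and d - row <= cc - 1.
def pvCellB (grid : List String) (col_count d row : Nat) : Char :=
  ((PySem.List.pyGetD grid (row : Int) "").toList).getD (col_count - 1 - (d - row)) ' '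

def pvStepB (grid : List String) (col_count d : Nat) (chars : List Char) (row : Nat) : List Char :=
  chars ++ [pvCellB grid col_count d row]

def pvRowB (grid : List String) (col_count row_count d : Nat) : List Char :=
  let lo := max 0 (d + 1 - col_count)
  let hi := min row_count (d + 1)
  (List.range' lo (hi - lo)).foldl (pvStepB grid col_count d) []

def skew_left_alt (grid : List String) : List String :=
  let row_count := grid.length
  let col_count := (PySem.List.pyGetD grid 0 "").toList.length
  (List.range (row_count + col_count - 1)).map (fun d => String.mk (pvRowB grid col_count row_count d))

-- ===== PRECONDITION & SPEC =====
-- Pre_ excludes exactly the inputs where Python A raises IndexError: the empty grid (grid[0])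
-- and grids in which some row is shorter than the first row (grid[row][col]).
def Pre_skew_left (grid : List String) : Prop :=
  grid ≠ [] ∧ ∀ s ∈ grid, (PySem.List.pyGetD grid 0 "").toList.length ≤ s.toList.length
instance (grid : List String) : Decidable (Pre_skew_left grid) := by unfold Pre_skew_left; infer_instance
def pvWitness_skew_left : List String := ["AB", "CD"]

def Spec_skew_left (grid : List String) (out : List String) : Prop := out = skew_left_alt grid
instance (grid : List String) (out : List String) : Decidable (Spec_skew_left grid out) := by unfold Spec_skew_left; infer_instance

-- ===== CLAIM (what is proved, stated in full; the proofs are below) =====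
def Claim_equal_skew_left : Prop := ∀ (grid : List String), Dom_skew_left grid → Pre_skew_left grid → Spec_skew_left grid (skew_left grid)

-- ===== LEMMAS AND PROOFS =====

-- the one character row `row` contributes to diagonal `d` (if any)
def pvContrib (grid : List String) (col_count row d : Nat) : List Char :=
  if row ≤ d ∧ d < col_count + row
  then [((PySem.List.pyGetD grid (row : Int) "").toList).getD (col_count - 1 - (d - row)) ' ']
  else []

theorem pvStepA_length (grid : List String) (cc row : Nat) (sk : List (List Char)) (col : Nat) :
    (pvStepA grid cc row sk col).length = sk.length := by
  simp [pvStepA]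

theorem foldl_stepA_length (grid : List String) (cc row : Nat) :
    ∀ (cs : List Nat) (sk : List (List Char)),
      (cs.foldl (pvStepA grid cc row) sk).length = sk.length := by
  intro cs
  induction cs with
  | nil => intro sk; rfl
  | cons c cs ih => intro sk; rw [List.foldl_cons, ih, pvStepA_length]

theorem pvStepA_getD (grid : List String) (cc row : Nat) (sk : List (List Char)) (col d : Nat)
    (hd : d < sk.length) :
    (pvStepA grid cc row sk col).getD d [] =
      sk.getD d [] ++ (if (cc - 1 - col) + row == d
        then [((PySem.List.pyGetD grid (row : Int) "").toList).getD col ' '] else []) := by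
  unfold pvStepA
  simp only [List.getD_eq_getElem?_getD, List.getElem?_set]
  by_cases h : (cc - 1 - col) + row = d
  · simp [h, hd, List.getD_eq_getElem?_getD]
  · simp [h]

theorem foldl_stepA_getD (grid : List String) (cc row : Nat) :
    ∀ (cs : List Nat) (sk : List (List Char)) (d : Nat), d < sk.length →
      (cs.foldl (pvStepA grid cc row) sk).getD d [] =
        sk.getD d [] ++ ((cs.filter (fun col => (cc - 1 - col) + row == d)).map
          (fun col => ((PySem.List.pyGetD grid (row : Int) "").toList).getD col ' ')) := by
  intro cs
  induction cs with
  | nil => intro sk d hd; simp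
  | cons c cs ih =>
    intro sk d hd
    rw [List.foldl_cons, ih _ d (by rw [pvStepA_length]; exact hd),
        pvStepA_getD grid cc row sk c d hd]
    by_cases h : (cc - 1 - c) + row = d
    · simp [h]
    · simp [h]

theorem filter_range_diag (cc row d : Nat) :
    (List.range cc).filter (fun col => (cc - 1 - col) + row == d) =
      if row ≤ d ∧ d < cc + row then [cc - 1 - (d - row)] else [] := by
  split
  · rename_i h
    have hlt : cc - 1 - (d - row) < cc := by omega
    have : (List.range cc).filter (fun col => (cc - 1 - col) + row == d) =
        (List.range cc).filter (fun col => col == cc - 1 - (d - row)) := by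
      apply List.filter_congr
      intro c hc
      simp only [List.mem_range] at hc
      rw [Bool.eq_iff_iff]
      simp only [beq_iff_eq]
      omega
    rw [this, List.filter_beq, List.count_range]
    simp [hlt]
  · rename_i h
    rw [List.filter_eq_nil_iff]
    intro c hc
    simp only [List.mem_range] at hc
    simp only [beq_iff_eq]
    omega

theorem innerA_getD (grid : List String) (cc row : Nat) (sk : List (List Char)) (d : Nat)
    (hd : d < sk.length) :
    (pvInnerA grid cc row sk).getD d [] = sk.getD d [] ++ pvContrib grid cc row d := by
  unfold pvInnerA pvContrib
  rw [foldl_stepA_getD grid cc row _ sk d hd, filter_range_diag]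
  split <;> rfl

theorem pvInnerA_length (grid : List String) (cc row : Nat) (sk : List (List Char)) :
    (pvInnerA grid cc row sk).length = sk.length :=
  foldl_stepA_length grid cc row (List.range cc) sk

theorem outerA_length (grid : List String) (cc : Nat) :
    ∀ (rs : List Nat) (sk : List (List Char)),
      (rs.foldl (fun sk row => pvInnerA grid cc row sk) sk).length = sk.length := by
  intro rs
  induction rs with
  | nil => intro sk; rfl
  | cons r rs ih => intro sk; rw [List.foldl_cons, ih]; exact pvInnerA_length grid cc r sk

theorem outerA_getD (grid : List String) (cc : Nat) :
    ∀ (rs : List Nat) (sk : List (List Char)) (d : Nat), d < sk.length →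
      (rs.foldl (fun sk row => pvInnerA grid cc row sk) sk).getD d [] =
        sk.getD d [] ++ (rs.map (fun row => pvContrib grid cc row d)).flatten := by
  intro rs
  induction rs with
  | nil => intro sk d hd; simp
  | cons r rs ih =>
    intro sk d hd
    rw [List.foldl_cons, ih _ d (by rw [pvInnerA_length]; exact hd),
        innerA_getD grid cc r sk d hd]
    simp [List.append_assoc]

theorem flatten_contrib (grid : List String) (cc d : Nat) :
    ∀ n, ((List.range n).map (fun row => pvContrib grid cc row d)).flatten =
      (List.range' (d + 1 - cc) (min n (d + 1) - (d + 1 - cc))).map (pvCellB grid cc d) := by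
  intro n
  induction n with
  | zero => simp
  | succ n ih =>
    rw [List.range_succ, List.map_append, List.flatten_append, ih]
    by_cases h1 : n ≤ d ∧ d < cc + n
    · have hmin : min (n + 1) (d + 1) - (d + 1 - cc) = (min n (d + 1) - (d + 1 - cc)) + 1 := by omega
      have harg : d + 1 - cc + 1 * (min n (d + 1) - (d + 1 - cc)) = n := by omega
      rw [hmin, List.range'_concat, harg, List.map_append]
      simp [pvContrib, pvCellB, h1]
    · have hmin : min (n + 1) (d + 1) - (d + 1 - cc) = min n (d + 1) - (d + 1 - cc) := by omega
      rw [hmin]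
      simp [pvContrib, h1]

theorem pvRowB_spec (grid : List String) (cc rc d : Nat) :
    pvRowB grid cc rc d = ((List.range rc).map (fun row => pvContrib grid cc row d)).flatten := by
  simp only [pvRowB]
  rw [show pvStepB grid cc d = fun chars row => chars ++ [pvCellB grid cc d row] from rfl,
    PySem.List.foldl_append_singleton_eq_map (pvCellB grid cc d), List.nil_append,
    flatten_contrib]
  simp

theorem main_aux (grid : List String) (rc cc : Nat) :
    ((List.range rc).foldl (fun sk row => pvInnerA grid cc row sk)
        (List.replicate (rc + cc - 1) [])).map (fun cs => String.mk cs) =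
      (List.range (rc + cc - 1)).map (fun d => String.mk (pvRowB grid cc rc d)) := by
  apply List.ext_getElem
  · rw [List.length_map, outerA_length, List.length_replicate, List.length_map, List.length_range]
  · intro d h1 h2
    have h1' : d < rc + cc - 1 := by
      simpa [outerA_length] using h1
    have hd0 : d < (List.replicate (rc + cc - 1) ([] : List Char)).length := by simpa using h1'
    have hmain := outerA_getD grid cc (List.range rc) (List.replicate (rc + cc - 1) []) d hd0
    rw [List.getD_replicate _ h1', List.nil_append] at hmain
    simp only [List.getElem_map, List.getElem_range]
    congr 1
    rw [← List.getD_eq_getElem _ [] (by simpa [outerA_length] using h1'), hmain]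
    rw [pvRowB_spec]

theorem skew_left_eq_alt (grid : List String) : skew_left grid = skew_left_alt grid :=
  main_aux grid grid.length (PySem.List.pyGetD grid 0 "").toList.length

-- ===== VERDICT (by name: the statement is the Claim_ definition above) =====
theorem skew_left_spec : Claim_equal_skew_left := by
  intro grid _ _
  unfold Spec_skew_left
  exact skew_left_eq_alt grid
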